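-- pv_equiv track=rewrite | github.com/jdoeun/TIL | codingTest/2025_03/250318_3.py | solution
-- ===== SOURCE A (Python) =====
-- from collections import Counter
--
-- def solution(k, tangerine):
--     counts = Counter(tangerine)
--     sorted_counts = sorted(counts.values(), reverse=True)
--
--     total = 0
--     answer = 0
--
--     for count in sorted_counts:
--         total += count
--         answer += 1
--
--         if total >= k:
--             break
--
--     return answer
-- ===== SOURCE B (Python) =====
-- from collections import Counter
--
-- def solution(k, tangerine):
--     counts = Counter(tangerine)
--     vals = list(counts.values())
--     total = 0
--     answer = 0
--     if vals:
--         bucket = Counter(vals)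
--         for c in range(max(vals), 0, -1):
--             for _ in range(bucket[c]):
--                 total += c
--                 answer += 1
--                 if total >= k:
--                     return answer
--     return answer
-- ===== Notes on version B (the rewrite author's own statement) =====
-- stated objective: alternative
-- what changed: Replaces the comparison sort of the Counter values by a counting-sort-style scan: a second Counter (histogram of counts) is walked from max(vals) down to 1, emitting each kind one at a time with the same break-after-add semantics.
import Mathlib
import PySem

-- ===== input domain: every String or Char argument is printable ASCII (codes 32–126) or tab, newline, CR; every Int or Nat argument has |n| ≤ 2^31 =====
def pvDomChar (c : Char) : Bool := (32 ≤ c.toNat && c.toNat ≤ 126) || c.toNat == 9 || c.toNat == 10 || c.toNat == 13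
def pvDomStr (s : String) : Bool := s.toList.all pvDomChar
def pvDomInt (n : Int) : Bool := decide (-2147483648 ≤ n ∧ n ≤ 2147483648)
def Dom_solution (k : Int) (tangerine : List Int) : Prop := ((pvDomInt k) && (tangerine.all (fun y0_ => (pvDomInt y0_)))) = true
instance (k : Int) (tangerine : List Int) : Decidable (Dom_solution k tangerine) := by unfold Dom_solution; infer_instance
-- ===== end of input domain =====

-- B replaces the comparison sort of Counter values by a bucket-histogram scan from the
-- maximum count downwards (alternative algorithm, same return value).

-- ===== PORT A =====
-- the for-loop with break: state (total, answer), break returns answer immediately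
def solLoopA (k : Int) : List Int → Int → Int → Int
  | [], _, answer => answer
  | c :: rest, total, answer =>
    let t := total + c
    let a := answer + 1
    if t ≥ k then a else solLoopA k rest t a

def solution (k : Int) (tangerine : List Int) : Int :=
  let counts := PySem.Dict.counter tangerine
  let sorted_counts := PySem.List.sorted counts.values (fun x => x) true
  solLoopA k sorted_counts 0 0

-- ===== PORT B =====
-- inner 'for _ in range(bucket[c])' loop; .inl = early return, .inr = fall through
def solInnerB (k c : Int) : Nat → Int → Int → Sum Int (Int × Int)
  | 0, total, answer => .inr (total, answer)
  | n + 1, total, answer =>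
    let t := total + c
    let a := answer + 1
    if t ≥ k then .inl a else solInnerB k c n t a

-- outer 'for c in range(max(vals), 0, -1)' loop
def solOuterB (k : Int) (bucket : PySem.Dict Int Int) : List Int → Int → Int → Int
  | [], _, answer => answer
  | c :: cs, total, answer =>
    match solInnerB k c (bucket.getD c 0).toNat total answer with
    | .inl ans => ans
    | .inr (t, a) => solOuterB k bucket cs t a

def solution_alt (k : Int) (tangerine : List Int) : Int :=
  let counts := PySem.Dict.counter tangerine
  let vals := counts.values
  match PySem.List.max? vals (fun x => x) with
  | none => 0      -- 'if vals:' false: fall through to 'return answer' with answer = 0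
  | some mx =>
    let bucket := PySem.Dict.counter vals
    solOuterB k bucket (PySem.List.pyRange mx 0 (-1)) 0 0

-- ===== PRECONDITION & SPEC =====
def Spec_solution (k : Int) (tangerine : List Int) (out : Int) : Prop := out = solution_alt k tangerine
instance (k : Int) (tangerine : List Int) (out : Int) : Decidable (Spec_solution k tangerine out) := by unfold Spec_solution; infer_instance

-- ===== CLAIM (what is proved, stated in full; the proofs are below) =====
def Claim_equal_solution : Prop := ∀ (k : Int) (tangerine : List Int), Dom_solution k tangerine → Spec_solution k tangerine (solution k tangerine)

-- ===== LEMMAS AND PROOFS =====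

-- A's loop over a block of n copies of c behaves like one inner-loop run of B
theorem loopA_replicate (k c : Int) :
    ∀ (n : Nat) (rest : List Int) (total answer : Int),
      solLoopA k (List.replicate n c ++ rest) total answer =
        match solInnerB k c n total answer with
        | .inl ans => ans
        | .inr (t, a) => solLoopA k rest t a := by
  intro n
  induction n with
  | zero => intro rest total answer; simp [solInnerB]
  | succ m ih =>
    intro rest total answer
    simp only [List.replicate_succ, List.cons_append, solLoopA, solInnerB]
    split_ifs with h
    · rfl
    · exact ih rest (total + c) (answer + 1)

-- A's loop over the concatenation of the blocks is B's outer loop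
theorem loopA_flat (k : Int) (bucket : PySem.Dict Int Int) :
    ∀ (cs : List Int) (total answer : Int),
      solLoopA k (cs.flatMap fun c => List.replicate (bucket.getD c 0).toNat c) total answer =
        solOuterB k bucket cs total answer := by
  intro cs
  induction cs with
  | nil => intro total answer; rfl
  | cons c cs ih =>
    intro total answer
    simp only [List.flatMap_cons, solOuterB]
    rw [loopA_replicate]
    cases h : solInnerB k c (bucket.getD c 0).toNat total answer with
    | inl ans => rfl
    | inr p => exact ih p.1 p.2

-- counting elements of the flattened bucket layout
theorem count_flat (f : Int → Nat) :
    ∀ (cs : List Int), cs.Nodup → ∀ (x : Int),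
      (cs.flatMap fun c => List.replicate (f c) c).count x = if x ∈ cs then f x else 0 := by
  intro cs
  induction cs with
  | nil => intro _ x; simp
  | cons c cs ih =>
    intro hnd x
    rcases List.nodup_cons.mp hnd with ⟨hc, hnd'⟩
    simp only [List.flatMap_cons, List.count_append, ih hnd', List.count_replicate, List.mem_cons]
    by_cases hx : x = c
    · subst hx
      simp [if_neg hc]
    · simp [hx, beq_iff_eq, Ne.symm hx]

-- pairwise order within one bucket block
theorem pairwise_replicate_le (n : Nat) (c : Int) :
    (List.replicate n c).Pairwise (fun a b => b ≤ a) := by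
  induction n with
  | zero => simp
  | succ m ih =>
    rw [List.replicate_succ, List.pairwise_cons]
    exact ⟨fun b hb => le_of_eq (List.eq_of_mem_replicate hb), ih⟩

-- pairwise order of the flattened bucket layout
theorem pairwise_flat (f : Int → Nat) :
    ∀ (cs : List Int), cs.Pairwise (· > ·) →
      (cs.flatMap fun c => List.replicate (f c) c).Pairwise (fun a b => b ≤ a) := by
  intro cs
  induction cs with
  | nil => intro _; simp
  | cons c cs ih =>
    intro hp
    rcases List.pairwise_cons.mp hp with ⟨hhead, htail⟩
    simp only [List.flatMap_cons]
    refine List.pairwise_append.mpr ⟨pairwise_replicate_le _ _, ih htail, ?_⟩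
    intro a ha b hb
    rcases List.mem_flatMap.mp hb with ⟨c', hc', hb'⟩
    rw [List.eq_of_mem_replicate ha, List.eq_of_mem_replicate hb']
    exact le_of_lt (hhead c' hc')

-- the bucket walk produces exactly sorted(vals, reverse=True)
theorem order_eq (vals : List Int) (mx : Int)
    (hmax : PySem.List.max? vals (fun x => x) = some mx)
    (hpos : ∀ v ∈ vals, 0 < v) :
    PySem.List.sorted vals (fun x => x) true =
      (PySem.List.pyRange mx 0 (-1)).flatMap (fun c => List.replicate (vals.count c) c) := by
  have hub : ∀ v ∈ vals, v ≤ mx := PySem.List.max?_isMax hmax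
  have hnd : (PySem.List.pyRange mx 0 (-1)).Nodup := by
    rw [PySem.List.pyRange_neg_one_eq_reverse]
    exact (List.nodup_reverse).mpr (PySem.List.nodup_pyRange_one _ _)
  have hcount : ∀ x, ((PySem.List.pyRange mx 0 (-1)).flatMap
      (fun c => List.replicate (vals.count c) c)).count x = vals.count x := by
    intro x
    rw [count_flat (fun c => vals.count c) _ hnd x]
    by_cases hx : x ∈ PySem.List.pyRange mx 0 (-1)
    · simp [hx]
    · rw [if_neg hx, eq_comm, List.count_eq_zero]
      intro hmem
      exact hx (PySem.List.mem_pyRange_neg_one.mpr ⟨hpos x hmem, hub x hmem⟩)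
  have hperm : ((PySem.List.pyRange mx 0 (-1)).flatMap
      (fun c => List.replicate (vals.count c) c)).Perm vals :=
    List.perm_iff_count.mpr hcount
  have hpw2 : ((PySem.List.pyRange mx 0 (-1)).flatMap
      (fun c => List.replicate (vals.count c) c)).Pairwise (fun a b => b ≤ a) := by
    apply pairwise_flat
    rw [PySem.List.pyRange_neg_one_eq_reverse]
    exact List.pairwise_reverse.mpr (PySem.List.pairwise_lt_pyRange_one _ _)
  have hpw1 : (PySem.List.sorted vals (fun x => x) true).Pairwise (fun a b => b ≤ a) :=
    PySem.List.sorted_pairwise_rev vals (fun x => x)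
  exact ((PySem.List.sorted_perm vals (fun x => x) true).trans hperm.symm).eq_of_pairwise
    (fun a b _ _ h1 h2 => le_antisymm h2 h1) hpw1 hpw2

-- every value of a Counter is positive
theorem counter_values_pos (t : List Int) :
    ∀ v ∈ (PySem.Dict.counter t).values, 0 < v := by
  intro v hv
  have : (PySem.Dict.counter t).values =
      (PySem.Set.ofList t).map (fun k => (t.count k : Int)) := by
    show (PySem.Dict.counter t).items.map (·.2) = _
    rw [PySem.Dict.items_counter]
    simp
  rw [this] at hv
  rcases List.mem_map.mp hv with ⟨kk, hkk, rfl⟩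
  have hmem : kk ∈ t := by simpa using hkk
  exact_mod_cast List.count_pos_iff.mpr hmem

-- ===== VERDICT (by name: the statement is the Claim_ definition above) =====
theorem solution_spec : Claim_equal_solution := by
  intro k tangerine _
  unfold Spec_solution solution solution_alt
  dsimp only
  cases hm : PySem.List.max? (PySem.Dict.counter tangerine).values (fun x => x) with
  | none =>
    have hnil : (PySem.Dict.counter tangerine).values = [] := by
      rwa [PySem.List.max?_eq_none_iff] at hm
    simp [hnil, PySem.List.sorted, solLoopA]
  | some mx =>
    dsimp only
    rw [order_eq _ mx hm (counter_values_pos tangerine)]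
    rw [← loopA_flat]
    have hf : (fun c => List.replicate (List.count c (PySem.Dict.counter tangerine).values) c) =
        (fun c => List.replicate ((PySem.Dict.counter (PySem.Dict.counter tangerine).values).getD c 0).toNat c) := by
      funext c
      rw [PySem.Dict.getD_counter]
      simp
    rw [hf]
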